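-- pv_equiv track=rewrite | github.com/KadhirV/Embedded-Sharepoint | comment_updater.py | find_brief
-- ===== SOURCE A (Python) =====
-- def find_brief(comment):
--     brief = []
--     found = False
--
--     for line in comment:
--         if '@brief' in line:
--             found = True
--             brief.append(line)
--             continue
--
--         if found == True:
--             if '@' in line or '*/' in line: return brief
--             brief.append(line)
--     return brief
-- ===== SOURCE B (Python) =====
-- def _in_brief(line):
--     # '@brief' lines always belong to the brief text; any other line that
--     # introduces a tag ('@...') or closes the comment ('*/') ends the block.
--     return '@brief' in line or not ('@' in line or '*/' in line)
--
--
-- def find_brief(comment):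
--     for start, line in enumerate(comment):
--         if '@brief' in line:
--             block = [line]
--             for nxt in comment[start + 1:]:
--                 if not _in_brief(nxt):
--                     break
--                 block.append(nxt)
--             return block
--     return []
-- ===== Notes on version B (the rewrite author's own statement) =====
-- stated objective: simpler
-- what changed: B locates the first '@brief' line and then take-whiles the following continuation lines (a line continues unless it introduces another tag or closes the comment), instead of A's single pass accumulating lines behind a boolean 'found' flag.
import Mathlib
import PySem

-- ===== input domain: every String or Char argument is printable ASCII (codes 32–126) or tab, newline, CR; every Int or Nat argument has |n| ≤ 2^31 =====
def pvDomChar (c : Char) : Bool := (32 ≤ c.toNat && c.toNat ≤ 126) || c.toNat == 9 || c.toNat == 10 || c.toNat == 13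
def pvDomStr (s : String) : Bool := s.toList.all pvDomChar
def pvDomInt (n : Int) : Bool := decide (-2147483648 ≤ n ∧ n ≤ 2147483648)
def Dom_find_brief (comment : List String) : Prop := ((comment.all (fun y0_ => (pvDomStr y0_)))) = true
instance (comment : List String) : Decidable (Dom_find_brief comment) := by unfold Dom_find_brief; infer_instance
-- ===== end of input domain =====

-- B finds the first '@brief' line and take-whiles the continuation lines after it, instead of A's accumulate-behind-a-flag pass (simpler decomposition; same cost).

-- ===== PORT A =====
-- the loop over `comment` with state (brief, found), literally A's branches in order
def find_brief_go : List String → List String → Bool → List String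
  | [], brief, _ => brief
  | line :: rest, brief, found =>
    if PySem.Str.isIn "@brief" line then
      find_brief_go rest (brief ++ [line]) true
    else if found then
      if PySem.Str.isIn "@" line || PySem.Str.isIn "*/" line then brief
      else find_brief_go rest (brief ++ [line]) found
    else find_brief_go rest brief found

def find_brief (comment : List String) : List String :=
  find_brief_go comment [] false

-- ===== PORT B =====
def pvInBrief (line : String) : Bool :=
  PySem.Str.isIn "@brief" line || !(PySem.Str.isIn "@" line || PySem.Str.isIn "*/" line)

-- B's outer `for start, line in enumerate(comment)` with early return: structural
-- recursion where `rest` is comment[start+1:]; the inner append-until-break loop is takeWhile.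
def find_brief_alt : List String → List String
  | [] => []
  | line :: rest =>
    if PySem.Str.isIn "@brief" line then
      line :: rest.takeWhile pvInBrief
    else find_brief_alt rest

-- ===== PRECONDITION & SPEC =====
def Spec_find_brief (comment : List String) (out : List String) : Prop := out = find_brief_alt comment
instance (comment : List String) (out : List String) : Decidable (Spec_find_brief comment out) := by unfold Spec_find_brief; infer_instance

-- ===== CLAIM (what is proved, stated in full; the proofs are below) =====
def Claim_equal_find_brief : Prop := ∀ (comment : List String), Dom_find_brief comment → Spec_find_brief comment (find_brief comment)

-- ===== LEMMAS AND PROOFS =====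

-- once `found` is true, A's loop appends exactly the lines for which pvInBrief holds, up to the first that fails
theorem find_brief_go_true (rest : List String) :
    ∀ acc : List String, find_brief_go rest acc true = acc ++ rest.takeWhile pvInBrief := by
  induction rest with
  | nil => intro acc; simp [find_brief_go]
  | cons l r ih =>
    intro acc
    by_cases hb : PySem.Str.isIn "@brief" l = true
    · have hp : pvInBrief l = true := by unfold pvInBrief; rw [hb]; rfl
      simp only [find_brief_go, if_pos hb, ih, List.takeWhile_cons, hp]
      simp
    · by_cases hstop : (PySem.Str.isIn "@" l || PySem.Str.isIn "*/" l) = true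
      · have hp : pvInBrief l = false := by
          unfold pvInBrief
          rw [hstop, (by revert hb; cases PySem.Str.isIn "@brief" l <;> simp : PySem.Str.isIn "@brief" l = false)]
          rfl
        simp only [find_brief_go, if_neg hb, if_pos hstop, List.takeWhile_cons, hp]
        simp
      · have hp : pvInBrief l = true := by
          unfold pvInBrief
          revert hstop; cases (PySem.Str.isIn "@" l || PySem.Str.isIn "*/" l) <;> simp
        simp only [find_brief_go, if_neg hb, if_neg hstop, ih, List.takeWhile_cons, hp]
        simp

theorem find_brief_eq_alt (comment : List String) :
    find_brief comment = find_brief_alt comment := by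
  induction comment with
  | nil => rfl
  | cons l rest ih =>
    by_cases hb : PySem.Str.isIn "@brief" l = true
    · unfold find_brief find_brief_alt
      simp only [find_brief_go, if_pos hb, find_brief_go_true]
      simp
    · unfold find_brief find_brief_alt
      simp only [find_brief_go]
      rw [if_neg hb, if_neg (by decide : ¬ (false = true)), if_neg hb]
      exact ih

-- ===== VERDICT (by name: the statement is the Claim_ definition above) =====
theorem find_brief_spec : Claim_equal_find_brief := by
  intro comment _
  unfold Spec_find_brief
  exact find_brief_eq_alt comment
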